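-- pv_equiv track=rewrite | github.com/chitrak7/ml | codes/models/homomorphism.py | extensions_helper
-- ===== SOURCE A (Python) =====
-- def extensions_helper(a,n):
--     if(n==1):
--         return [[i] for i in a]
--
--     else:
--         t    = extensions_helper(a, n-1)
--         exts = []
--         for i in a:
--             for k in t:
--                 exts.append([i] + k)
--
--         return exts
-- ===== SOURCE B (Python) =====
-- def extensions_helper(a, n):
--     if n == 1:
--         return [[i] for i in a]
--     h = n // 2
--     left = extensions_helper(a, h)
--     right = extensions_helper(a, n - h)
--     return [l + r for l in left for r in right]
-- ===== Notes on version B (the rewrite author's own statement) =====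
-- stated objective: alternative
-- what changed: Replaces A's peel-one-element linear recursion (n-1 levels, each prepending single elements) by a divide-and-conquer that splits n in half and concatenates the two half-length products, giving O(log n) recursion depth.
import Mathlib
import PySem

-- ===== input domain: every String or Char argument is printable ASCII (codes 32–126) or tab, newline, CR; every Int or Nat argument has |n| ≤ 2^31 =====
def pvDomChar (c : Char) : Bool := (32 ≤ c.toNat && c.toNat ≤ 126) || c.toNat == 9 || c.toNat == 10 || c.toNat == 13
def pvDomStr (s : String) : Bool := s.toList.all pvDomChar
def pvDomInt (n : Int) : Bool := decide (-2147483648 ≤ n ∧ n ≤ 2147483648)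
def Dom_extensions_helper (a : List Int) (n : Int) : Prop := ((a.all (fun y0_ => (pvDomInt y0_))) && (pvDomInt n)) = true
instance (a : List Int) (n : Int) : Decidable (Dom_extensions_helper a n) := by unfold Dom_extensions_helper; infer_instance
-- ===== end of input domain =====

-- B replaces A's peel-one recursion on n by a divide-and-conquer split of n (objective: alternative);
-- for n ≤ 0 both Pythons recurse forever (RecursionError): those inputs are outside Pre_.


-- ===== PORT A =====
-- A's recursion on n, transcribed with a Nat fuel n.toNat; fuel 0 (i.e. n ≤ 0,
-- where Python A recurses forever) is excluded by Pre_ below.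
def extensions_helperAux (a : List Int) : Nat → List (List Int)
  | 0 => []
  | m + 1 =>
    if m = 0 then a.map (fun i => [i])
    else
      let t := extensions_helperAux a m
      a.foldl (fun exts i => exts ++ t.map (fun k => i :: k)) []

def extensions_helper (a : List Int) (n : Int) : List (List Int) :=
  extensions_helperAux a n.toNat

-- ===== PORT B =====
-- B's divide-and-conquer on n, with Nat fuel n.toNat (fuel 0 = the n ≤ 0 inputs
-- where Python B also recurses forever, excluded by Pre_).
def extensions_helperAltAux (a : List Int) (n : Int) : Nat → List (List Int)
  | 0 => []
  | fuel + 1 =>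
    if n = 1 then a.map (fun i => [i])
    else
      let h := PySem.Int.floordiv n 2
      let left := extensions_helperAltAux a h fuel
      let right := extensions_helperAltAux a (n - h) fuel
      left.flatMap (fun l => right.map (fun r => l ++ r))

def extensions_helper_alt (a : List Int) (n : Int) : List (List Int) :=
  extensions_helperAltAux a n n.toNat

-- ===== PRECONDITION & SPEC =====
-- Pre_ excludes n ≤ 0, where Python A recurses forever (RecursionError); B raises there too.
def Pre_extensions_helper (a : List Int) (n : Int) : Prop := 1 ≤ n
instance (a : List Int) (n : Int) : Decidable (Pre_extensions_helper a n) := by unfold Pre_extensions_helper; infer_instance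
def pvWitness_extensions_helper : List Int × Int := ([1, 2], 3)

def Spec_extensions_helper (a : List Int) (n : Int) (out : List (List Int)) : Prop := out = extensions_helper_alt a n
instance (a : List Int) (n : Int) (out : List (List Int)) : Decidable (Spec_extensions_helper a n out) := by unfold Spec_extensions_helper; infer_instance

-- ===== CLAIM =====
def Claim_equal_extensions_helper : Prop := ∀ (a : List Int) (n : Int), Dom_extensions_helper a n → Pre_extensions_helper a n → Spec_extensions_helper a n (extensions_helper a n)

-- ===== LEMMAS AND PROOFS =====

theorem map_single_eq_flatMap (a : List Int) :
    a.map (fun i => ([i] : List Int)) = a.flatMap (fun i => [[i]]) := by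
  induction a with
  | nil => rfl
  | cons x xs ih => simp [ih]

-- Canonical product of length m (first coordinate slowest).
def prodF (a : List Int) : Nat → List (List Int)
  | 0 => [[]]
  | m + 1 => a.flatMap (fun i => (prodF a m).map (fun k => i :: k))

theorem extensions_helperAux_eq_prodF (a : List Int) (m : Nat) :
    extensions_helperAux a (m + 1) = prodF a (m + 1) := by
  induction m with
  | zero =>
    simp [extensions_helperAux, prodF, map_single_eq_flatMap]
  | succ m ih =>
    show (if m + 1 = 0 then _ else _) = _
    rw [if_neg (Nat.succ_ne_zero m)]
    simp only []
    rw [PySem.List.foldl_append_eq_flatMap, ih]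
    rfl

theorem prodF_add (a : List Int) (p q : Nat) :
    prodF a (p + q) =
      (prodF a p).flatMap (fun l => (prodF a q).map (fun r => l ++ r)) := by
  induction p with
  | zero => simp [prodF]
  | succ p ih =>
    have : p + 1 + q = (p + q) + 1 := by omega
    rw [this]
    simp only [prodF, ih, List.flatMap_map, List.map_flatMap, List.flatMap_assoc, List.map_map]
    rfl

theorem extensions_helperAltAux_eq_prodF (a : List Int) :
    ∀ (fuel : Nat) (n : Int), 1 ≤ n → n.toNat ≤ fuel →
      extensions_helperAltAux a n fuel = prodF a n.toNat := by
  intro fuel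
  induction fuel with
  | zero => intro n h1 h2; omega
  | succ fuel ih =>
    intro n h1 h2
    by_cases hn1 : n = 1
    · subst hn1
      simp [extensions_helperAltAux, prodF, map_single_eq_flatMap]
    · have hn2 : 2 ≤ n := by omega
      have hh : PySem.Int.floordiv n 2 = n / 2 :=
        PySem.Int.floordiv_eq_ediv_of_pos (by omega)
      have h1h : 1 ≤ n / 2 := by omega
      have hlt : n / 2 ≤ n - 1 := by omega
      rw [show extensions_helperAltAux a n (fuel + 1) =
          (extensions_helperAltAux a (PySem.Int.floordiv n 2) fuel).flatMap
            (fun l => (extensions_helperAltAux a (n - PySem.Int.floordiv n 2) fuel).map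
              (fun r => l ++ r))
        from by simp [extensions_helperAltAux, hn1]]
      rw [hh]
      rw [ih (n / 2) h1h (by omega), ih (n - n / 2) (by omega) (by omega)]
      rw [← prodF_add]
      congr 1
      omega

-- ===== VERDICT =====
theorem extensions_helper_spec : Claim_equal_extensions_helper := by
  intro a n _ hpre
  unfold Spec_extensions_helper extensions_helper extensions_helper_alt
  unfold Pre_extensions_helper at hpre
  rw [extensions_helperAltAux_eq_prodF a n.toNat n hpre (le_refl _)]
  have h1 : n.toNat = (n.toNat - 1) + 1 := by omega
  rw [h1, extensions_helperAux_eq_prodF]
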